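-- pv_equiv track=rewrite | github.com/dumpmemory/MagiAttention | tests/test_comm/test_group_collective_utils.py | _seqlens2curanges
-- ===== SOURCE A (Python) =====
-- from itertools import accumulate, chain
--
-- def _seqlens2curanges(
--
--     seqlens: list[int],
-- ) -> list[tuple[int, int]]:
--     cu_seqlens = list(accumulate(seqlens))
--     return [
--         (cu_seqlens[i - 1], cu_seqlens[i]) if i > 0 else (0, cu_seqlens[i])
--         for i in range(len(cu_seqlens))
--     ]
-- ===== SOURCE B (Python) =====
-- def _seqlens2curanges(seqlens):
--     # Right-to-left: start from the total, peel lengths off the end,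
--     # emitting ranges back-to-front; reverse once at the end.
--     end = sum(seqlens)
--     out = []
--     for s in reversed(seqlens):
--         out.append((end - s, end))
--         end -= s
--     out.reverse()
--     return out
-- ===== Notes on version B (the rewrite author's own statement) =====
-- stated objective: alternative
-- what changed: Instead of accumulating prefix sums left-to-right and pairing adjacent entries by index, B computes the total once and walks the list right-to-left, maintaining the current end boundary and emitting (end-s, end) back-to-front, reversing once at the end; no prefix-sum array, no indexing, opposite traversal order.
import Mathlib
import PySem

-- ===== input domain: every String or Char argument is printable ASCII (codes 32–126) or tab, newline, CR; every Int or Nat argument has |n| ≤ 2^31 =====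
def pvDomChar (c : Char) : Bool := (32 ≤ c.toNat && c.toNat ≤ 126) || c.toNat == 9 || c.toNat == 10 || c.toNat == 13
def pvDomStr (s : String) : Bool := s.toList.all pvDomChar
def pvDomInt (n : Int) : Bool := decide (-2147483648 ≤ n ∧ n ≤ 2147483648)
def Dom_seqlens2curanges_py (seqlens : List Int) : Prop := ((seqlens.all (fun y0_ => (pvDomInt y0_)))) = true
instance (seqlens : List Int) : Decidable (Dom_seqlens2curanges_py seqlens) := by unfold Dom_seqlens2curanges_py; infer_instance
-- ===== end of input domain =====

-- B replaces A's "accumulate prefix sums, then pair adjacent entries by index" by a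
-- right-to-left walk from the total, emitting ranges back-to-front (objective: alternative).

-- ===== PORT A =====
-- itertools.accumulate: running sums with carry c
def pvAccFrom (c : Int) : List Int → List Int
  | [] => []
  | a :: t => (c + a) :: pvAccFrom (c + a) t

-- the comprehension over range(len(cu_seqlens)); indices i and i-1 are always in range
-- for i in range(len(cu)), so Python indexing never raises and getD is exact here
def seqlens2curanges_py (seqlens : List Int) : List (Int × Int) :=
  let cu_seqlens := pvAccFrom 0 seqlens
  (List.range cu_seqlens.length).map (fun i =>
    if i > 0 then (cu_seqlens.getD (i - 1) 0, cu_seqlens.getD i 0)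
    else (0, cu_seqlens.getD i 0))

-- ===== PORT B =====
-- end = sum(seqlens); for s in reversed(seqlens): append (end-s, end); end -= s; reverse
def seqlens2curanges_py_alt (seqlens : List Int) : List (Int × Int) :=
  let e := seqlens.foldl (· + ·) 0
  let r := seqlens.reverse.foldl
    (fun (st : Int × List (Int × Int)) s => (st.1 - s, st.2 ++ [(st.1 - s, st.1)])) (e, [])
  r.2.reverse

-- ===== PRECONDITION & SPEC =====
def Spec_seqlens2curanges_py (seqlens : List Int) (out : List (Int × Int)) : Prop := out = seqlens2curanges_py_alt seqlens
instance (seqlens : List Int) (out : List (Int × Int)) : Decidable (Spec_seqlens2curanges_py seqlens out) := by unfold Spec_seqlens2curanges_py; infer_instance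

-- ===== CLAIM (what is proved, stated in full; the proofs are below) =====
def Claim_equal_seqlens2curanges_py : Prop := ∀ (seqlens : List Int), Dom_seqlens2curanges_py seqlens → Spec_seqlens2curanges_py seqlens (seqlens2curanges_py seqlens)

-- ===== LEMMAS AND PROOFS =====

-- the canonical forward scan both sides are proved equal to
def pvGo (start : Int) : List Int → List (Int × Int)
  | [] => []
  | s :: t => (start, start + s) :: pvGo (start + s) t

-- adjacent-pair zip with a carried previous element
def pvAdjZip (p : Int) : List Int → List (Int × Int)
  | [] => []
  | y :: r => (p, y) :: pvAdjZip y r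

-- the indexed comprehension body over a nonempty cu equals the adjacent-pair zip
theorem pv_range_map_adjZip (rest : List Int) : ∀ (x : Int),
    (List.range rest.length).map
      (fun i => ((x :: rest).getD i 0, rest.getD i 0)) = pvAdjZip x rest := by
  induction rest with
  | nil => intro x; simp [pvAdjZip]
  | cons y r ih =>
    intro x
    simp only [List.length_cons, List.range_succ_eq_map, List.map_cons, List.map_map]
    simp only [pvAdjZip, List.getD_cons_zero]
    exact congrArg _ (ih y)

-- adjacent-zipping the prefix sums from carry c is exactly the forward scan
theorem pv_adjZip_acc (t : List Int) : ∀ (c : Int),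
    pvAdjZip c (pvAccFrom c t) = pvGo c t := by
  induction t with
  | nil => intro c; rfl
  | cons s r ih => intro c; simp [pvAccFrom, pvAdjZip, pvGo, ih]

-- A's port computes the forward scan
theorem pv_A_eq_go (seqlens : List Int) : seqlens2curanges_py seqlens = pvGo 0 seqlens := by
  unfold seqlens2curanges_py
  cases seqlens with
  | nil => rfl
  | cons a t =>
    simp only [pvAccFrom, List.length_cons, List.range_succ_eq_map, List.map_cons,
      List.map_map]
    have h1 : (0 : Int) + a = a := by ring
    rw [h1]
    show (0, (a :: pvAccFrom a t).getD 0 0) ::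
        (List.range (pvAccFrom a t).length).map _ = pvGo 0 (a :: t)
    have : ((fun i => if i > 0 then ((a :: pvAccFrom a t).getD (i-1) 0, (a :: pvAccFrom a t).getD i 0)
            else ((0:Int), (a :: pvAccFrom a t).getD i 0)) ∘ (· + 1))
          = fun i => ((a :: pvAccFrom a t).getD i 0, (pvAccFrom a t).getD i 0) := by
      funext i
      simp [Function.comp]
    rw [this, pv_range_map_adjZip, pv_adjZip_acc]
    simp [pvGo]

theorem pv_foldl_add (l : List Int) : ∀ (c : Int), l.foldl (· + ·) c = c + l.sum := by
  induction l with
  | nil => intro c; simp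
  | cons a t ih => intro c; simp [List.foldl, ih, List.sum_cons]; ring

-- the reversed fold from c + sum l lands on c and the reversed forward scan
theorem pv_foldr_go (l : List Int) : ∀ (c : Int),
    List.foldr (fun s (st : Int × List (Int × Int)) => (st.1 - s, st.2 ++ [(st.1 - s, st.1)]))
      (c + l.sum, []) l = (c, (pvGo c l).reverse) := by
  induction l with
  | nil => intro c; simp [pvGo]
  | cons s t ih =>
    intro c
    have h : c + (s :: t).sum = (c + s) + t.sum := by simp [List.sum_cons]; ring
    rw [List.foldr_cons, h, ih (c + s)]
    simp [pvGo]

-- B's port also computes the forward scan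
theorem pv_B_eq_go (seqlens : List Int) : seqlens2curanges_py_alt seqlens = pvGo 0 seqlens := by
  show ((seqlens.reverse.foldl
      (fun (st : Int × List (Int × Int)) s => (st.1 - s, st.2 ++ [(st.1 - s, st.1)]))
      (seqlens.foldl (· + ·) 0, [])).2).reverse = pvGo 0 seqlens
  rw [List.foldl_reverse, pv_foldl_add, pv_foldr_go seqlens 0]
  simp

-- ===== VERDICT (by name: the statement is the Claim_ definition above) =====
theorem seqlens2curanges_py_spec : Claim_equal_seqlens2curanges_py := by
  intro seqlens _
  unfold Spec_seqlens2curanges_py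
  rw [pv_A_eq_go, pv_B_eq_go]
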